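-- pv_equiv track=rewrite | github.com/LightspeedDMS/code-indexer | src/code_indexer/server/mcp/handlers/scip.py | _filter_audit_entries
-- ===== SOURCE A (Python) =====
-- from typing import Dict, Any, Optional, List
--
-- def _filter_audit_entries(
--     entries: List[Dict[str, Any]],
--     filter_user: Optional[str],
--     action: Optional[str],
--     from_date: Optional[str],
--     to_date: Optional[str],
--     limit: int,
-- ) -> List[Dict[str, Any]]:
--     """Filter audit log entries by user, action, and date range.
--
--     Used by both handle_scip_pr_history/handle_scip_cleanup_history (this module)
--     and handle_query_audit_logs (currently in _legacy.py, to be extracted to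
--     admin.py in a future Story #496 step).
--     """
--     filtered = entries
--     if filter_user:
--         filtered = [
--             e for e in filtered if e.get("user", "").lower() == filter_user.lower()
--         ]
--     if action:
--         filtered = [
--             e for e in filtered if action.lower() in e.get("action", "").lower()
--         ]
--     if from_date:
--         filtered = [e for e in filtered if e.get("timestamp", "") >= from_date]
--     if to_date:
--         filtered = [e for e in filtered if e.get("timestamp", "") <= to_date]
--     return filtered[:limit]
-- ===== SOURCE B (Python) =====
-- def _filter_audit_entries(entries, filter_user, action, from_date, to_date, limit):
--     """Single pass: test all active filters per entry, then slice at the end."""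
--     def keep(e):
--         if filter_user and e.get("user", "").lower() != filter_user.lower():
--             return False
--         if action and action.lower() not in e.get("action", "").lower():
--             return False
--         ts = e.get("timestamp", "")
--         if from_date and ts < from_date:
--             return False
--         if to_date and ts > to_date:
--             return False
--         return True
--
--     result = [e for e in entries if keep(e)]
--     return result[:limit]
-- ===== Notes on version B (the rewrite author's own statement) =====
-- stated objective: alternative
-- what changed: B replaces A's four successive list-comprehension passes (one per active filter) by a single pass with one keep() predicate that checks all active filters per entry, slicing once at the end.
import Mathlib
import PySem

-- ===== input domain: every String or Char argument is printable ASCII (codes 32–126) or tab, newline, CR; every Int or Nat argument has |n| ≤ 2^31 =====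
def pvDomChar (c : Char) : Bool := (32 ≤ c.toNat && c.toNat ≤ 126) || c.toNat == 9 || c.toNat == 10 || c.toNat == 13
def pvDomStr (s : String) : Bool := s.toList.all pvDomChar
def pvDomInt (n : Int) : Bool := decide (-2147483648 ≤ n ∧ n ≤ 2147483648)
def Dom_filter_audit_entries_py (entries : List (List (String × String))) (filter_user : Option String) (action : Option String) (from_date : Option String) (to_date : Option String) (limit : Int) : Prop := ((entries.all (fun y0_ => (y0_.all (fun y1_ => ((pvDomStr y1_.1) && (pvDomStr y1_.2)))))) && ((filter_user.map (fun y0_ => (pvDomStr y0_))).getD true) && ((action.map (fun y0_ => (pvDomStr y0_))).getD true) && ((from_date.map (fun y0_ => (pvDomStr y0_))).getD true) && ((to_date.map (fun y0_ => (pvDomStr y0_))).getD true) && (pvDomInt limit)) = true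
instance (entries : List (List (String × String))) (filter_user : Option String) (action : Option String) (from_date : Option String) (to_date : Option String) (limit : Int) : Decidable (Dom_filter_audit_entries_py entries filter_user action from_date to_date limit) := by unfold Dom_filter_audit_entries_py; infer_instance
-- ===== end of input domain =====

-- ===== PORT A =====
-- shared Python semantics helpers: e.get(k, "") on an assoc list (first match), and Python truthiness of Optional[str]
def pvGet (e : List (String × String)) (k d : String) : String :=
  match e.find? (fun p => p.1 == k) with
  | some p => p.2
  | none => d

def pvTruthy (o : Option String) : Bool :=
  match o with
  | none => false
  | some s => !(s == "")

def filter_audit_entries_py (entries : List (List (String × String))) (filter_user : Option String) (action : Option String) (from_date : Option String) (to_date : Option String) (limit : Int) : List (List (String × String)) :=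
  let filtered := entries
  let filtered := if pvTruthy filter_user then
      filtered.filter (fun e => PySem.Str.lower (pvGet e "user" "") == PySem.Str.lower (filter_user.getD ""))
    else filtered
  let filtered := if pvTruthy action then
      filtered.filter (fun e => PySem.Str.isIn (PySem.Str.lower (action.getD "")) (PySem.Str.lower (pvGet e "action" "")))
    else filtered
  let filtered := if pvTruthy from_date then
      filtered.filter (fun e => decide (from_date.getD "" ≤ pvGet e "timestamp" ""))
    else filtered
  let filtered := if pvTruthy to_date then
      filtered.filter (fun e => decide (pvGet e "timestamp" "" ≤ to_date.getD ""))
    else filtered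
  PySem.List.slice filtered none (some limit)

-- ===== PORT B =====
-- B: a single keep predicate checking every active filter, applied in one pass; slice at the end
def pvKeep (filter_user action from_date to_date : Option String) (e : List (String × String)) : Bool :=
  if pvTruthy filter_user && !(PySem.Str.lower (pvGet e "user" "") == PySem.Str.lower (filter_user.getD "")) then false
  else if pvTruthy action && !(PySem.Str.isIn (PySem.Str.lower (action.getD "")) (PySem.Str.lower (pvGet e "action" ""))) then false
  else if pvTruthy from_date && decide (pvGet e "timestamp" "" < from_date.getD "") then false
  else if pvTruthy to_date && decide (to_date.getD "" < pvGet e "timestamp" "") then false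
  else true

def filter_audit_entries_py_alt (entries : List (List (String × String))) (filter_user : Option String) (action : Option String) (from_date : Option String) (to_date : Option String) (limit : Int) : List (List (String × String)) :=
  let result := entries.filter (pvKeep filter_user action from_date to_date)
  PySem.List.slice result none (some limit)

-- ===== PRECONDITION & SPEC =====
def Spec_filter_audit_entries_py (entries : List (List (String × String))) (filter_user : Option String) (action : Option String) (from_date : Option String) (to_date : Option String) (limit : Int) (out : List (List (String × String))) : Prop := out = filter_audit_entries_py_alt entries filter_user action from_date to_date limit
instance (entries : List (List (String × String))) (filter_user : Option String) (action : Option String) (from_date : Option String) (to_date : Option String) (limit : Int) (out : List (List (String × String))) : Decidable (Spec_filter_audit_entries_py entries filter_user action from_date to_date limit out) := by unfold Spec_filter_audit_entries_py; infer_instance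

-- ===== CLAIM (what is proved, stated in full; the proofs are below) =====
def Claim_equal_filter_audit_entries_py : Prop := ∀ (entries : List (List (String × String))) (filter_user : Option String) (action : Option String) (from_date : Option String) (to_date : Option String) (limit : Int), Dom_filter_audit_entries_py entries filter_user action from_date to_date limit → Spec_filter_audit_entries_py entries filter_user action from_date to_date limit (filter_audit_entries_py entries filter_user action from_date to_date limit)

-- ===== LEMMAS AND PROOFS =====
theorem pvCondFilter {α : Type} (l : List α) (a : Bool) (c : α → Bool) :
    (if a = true then l.filter c else l) = l.filter (fun e => !a || c e) := by
  cases a <;> simp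

theorem pvKeep_eq (filter_user action from_date to_date : Option String) (e : List (String × String)) :
    pvKeep filter_user action from_date to_date e =
      ((!pvTruthy filter_user || (PySem.Str.lower (pvGet e "user" "") == PySem.Str.lower (filter_user.getD ""))) &&
       (!pvTruthy action || PySem.Str.isIn (PySem.Str.lower (action.getD "")) (PySem.Str.lower (pvGet e "action" ""))) &&
       (!pvTruthy from_date || decide (from_date.getD "" ≤ pvGet e "timestamp" "")) &&
       (!pvTruthy to_date || decide (pvGet e "timestamp" "" ≤ to_date.getD ""))) := by
  unfold pvKeep
  have h3 : decide (pvGet e "timestamp" "" < from_date.getD "") =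
      !decide (from_date.getD "" ≤ pvGet e "timestamp" "") := by
    simp [← decide_not, not_le]
  have h4 : decide (to_date.getD "" < pvGet e "timestamp" "") =
      !decide (pvGet e "timestamp" "" ≤ to_date.getD "") := by
    simp [← decide_not, not_le]
  rw [h3, h4]
  generalize pvTruthy filter_user = a1
  generalize pvTruthy action = a2
  generalize pvTruthy from_date = a3
  generalize pvTruthy to_date = a4
  generalize (PySem.Str.lower (pvGet e "user" "") == PySem.Str.lower (filter_user.getD "")) = b1
  generalize PySem.Str.isIn (PySem.Str.lower (action.getD "")) (PySem.Str.lower (pvGet e "action" "")) = b2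
  generalize decide (from_date.getD "" ≤ pvGet e "timestamp" "") = b3
  generalize decide (pvGet e "timestamp" "" ≤ to_date.getD "") = b4
  revert a1 a2 a3 a4 b1 b2 b3 b4
  decide

-- ===== VERDICT (by name: the statement is the Claim_ definition above) =====
theorem filter_audit_entries_py_spec : Claim_equal_filter_audit_entries_py := by
  intro entries filter_user action from_date to_date limit _
  unfold Spec_filter_audit_entries_py filter_audit_entries_py filter_audit_entries_py_alt
  dsimp only
  rw [pvCondFilter, pvCondFilter, pvCondFilter, pvCondFilter,
      List.filter_filter, List.filter_filter, List.filter_filter]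
  congr 1
  apply List.filter_congr
  intro e _
  rw [pvKeep_eq]
  generalize pvTruthy filter_user = a1
  generalize pvTruthy action = a2
  generalize pvTruthy from_date = a3
  generalize pvTruthy to_date = a4
  cases a1 <;> cases a2 <;> cases a3 <;> cases a4 <;> simp [Bool.and_assoc, Bool.and_comm, Bool.and_left_comm]
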